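-- pv_equiv track=rewrite | github.com/b3h4re/Makarov_hw_SEPMP | contest2_spring_2024/e.py | process_test
-- ===== SOURCE A (Python) =====
-- from collections import deque
--
-- def bfs(graph, start, end, parent, used, flows):
--     q = deque()
--     q.append(start)
--     used[start] = True
--     while len(q) > 0:
--         vertex = q.popleft()
--         if vertex == end:
--             return
--         for neighbor in range(len(graph)):
--             if flows[vertex][neighbor] > 0 and not used[neighbor]:
--                 used[neighbor] = True
--                 parent[neighbor] = vertex
--                 q.append(neighbor)
--
-- def get_flow(end, parent, flows):
--     if parent[end] == -1:
--         return
--     flow = get_flow(parent[end], parent, flows)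
--     if flow is None:
--         return flows[parent[end]][end]
--     return min(flows[parent[end]][end], get_flow(parent[end], parent, flows))
--
-- def adjust_flows(end, flow, flows, parent):
--     if parent[end] == -1:
--         return
--     adjust_flows(parent[end], flow, flows, parent)
--     flows[parent[end]][end] -= flow
--     flows[end][parent[end]] += flow
--
-- def find_flow(graph, start,  end):
--     res = 0
--     flows = [[graph[j][i] for i in range(len(graph))] for j in range(len(graph))]
--     while True:
--         used = [False] * len(graph)
--         parent = [-1] * len(graph)
--         bfs(graph, start, end, parent, used, flows)
--
--         flow = get_flow(end, parent, flows)
--         adjust_flows(end, flow, flows, parent)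
--
--         if flow is None:
--             break
--         res += flow
--     return res
--
-- def process_test(graph):
--     mn = None
--     for v in range(1, len(graph)):
--         flow = find_flow(graph, 0, v)
--         if mn is None:
--             mn = flow
--         mn = min(mn, flow)
--     return mn
-- ===== SOURCE B (Python) =====
-- def process_test(graph):
--     n = len(graph)
--
--     def max_flow(sink):
--         flows = [row[:n] for row in graph]
--         total = 0
--         while True:
--             # BFS over the residual graph using an index-scanned list as the queue
--             used = [False] * n
--             used[0] = True
--             parent = [-1] * n
--             order = [0]
--             i = 0
--             while i < len(order):
--                 v = order[i]
--                 i += 1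
--                 if v == sink:
--                     break
--                 new = [w for w in range(n) if flows[v][w] > 0 and not used[w]]
--                 for w in new:
--                     used[w] = True
--                     parent[w] = v
--                 order += new
--             # follow parent pointers once: path as explicit edge list (root-to-sink is reversed(path))
--             path = []
--             v = sink
--             while parent[v] != -1:
--                 path.append((parent[v], v))
--                 v = parent[v]
--             if not path:
--                 break
--             aug = min(flows[u][w] for u, w in path)
--             for u, w in reversed(path):
--                 flows[u][w] -= aug
--                 flows[w][u] += aug
--             total += aug
--         return total
--
--     vals = [max_flow(sink) for sink in range(1, n)]
--     return min(vals) if vals else None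
-- ===== Notes on version B (the rewrite author's own statement) =====
-- stated objective: alternative
-- what changed: B extracts each BFS augmenting path once as an explicit edge list by a single walk up the parent pointers, taking the bottleneck as a min-fold over that list and augmenting by one pass over it, replacing A's doubly-recursive get_flow (whose recursive call is evaluated twice) and recursive adjust_flows; B's BFS scans a growing list by index and batches newly discovered vertices, and the final answer is a min over the list of per-sink flows.
-- outside the precondition, e.g. on process_test([[0, 1], [1]]): A raises IndexError, B returns 1
import Mathlib
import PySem

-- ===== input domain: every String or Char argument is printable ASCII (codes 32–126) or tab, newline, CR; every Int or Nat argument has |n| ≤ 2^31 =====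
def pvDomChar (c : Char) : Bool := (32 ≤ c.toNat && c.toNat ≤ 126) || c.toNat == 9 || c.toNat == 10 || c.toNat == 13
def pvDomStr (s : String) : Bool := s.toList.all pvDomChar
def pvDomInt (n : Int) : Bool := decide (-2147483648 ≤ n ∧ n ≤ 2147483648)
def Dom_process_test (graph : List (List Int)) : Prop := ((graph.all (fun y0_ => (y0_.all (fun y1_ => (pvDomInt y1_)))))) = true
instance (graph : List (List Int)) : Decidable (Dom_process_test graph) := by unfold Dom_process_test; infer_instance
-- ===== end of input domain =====

-- B extracts each augmenting path once, as an explicit edge list walked up the parent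
-- pointers (bottleneck = min-fold over the list, augmentation = one pass over it), instead
-- of A's doubly-recursive get_flow / adjust_flows; objective: alternative.

-- ===== PORT A =====
-- shared cell accessors for the adjacency/residual matrix (all accesses are in range on Pre_)
def pvGet2 (m : List (List Int)) (i j : Nat) : Int := (m.getD i []).getD j 0
def pvUpd2 (m : List (List Int)) (i j : Nat) (f : Int → Int) : List (List Int) :=
  m.set i ((m.getD i []).set j (f (pvGet2 m i j)))

-- bfs: deque loop; fuel = n bounds the pops (each queued vertex is a distinct newly-used vertex)
def pvBfsA (n : Nat) (flows : List (List Int)) (e : Nat) :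
    Nat → List Nat → List Bool → List Int → List Bool × List Int
  | 0, _, used, parent => (used, parent)
  | _+1, [], used, parent => (used, parent)
  | fuel+1, v :: q, used, parent =>
    if v = e then (used, parent)
    else
      let s := (List.range n).foldl
        (fun (s : List Nat × List Bool × List Int) w =>
          if pvGet2 flows v w > 0 ∧ s.2.1.getD w true = false then
            (s.1 ++ [w], s.2.1.set w true, s.2.2.set w (Int.ofNat v))
          else s)
        (q, used, parent)
      pvBfsA n flows e fuel s.1 s.2.1 s.2.2

-- get_flow: A's literal double recursion (the recursive call really is made twice);
-- fuel = n bounds the parent-chain length on every run (parents form a BFS forest)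
def pvGetFlowA (flows : List (List Int)) (parent : List Int) : Nat → Nat → Option Int
  | 0, _ => none
  | fuel+1, e =>
    let p := parent.getD e (-1)
    if p = -1 then none
    else
      match pvGetFlowA flows parent fuel p.toNat with
      | none => some (pvGet2 flows p.toNat e)
      | some _ =>
        match pvGetFlowA flows parent fuel p.toNat with
        | none => some (pvGet2 flows p.toNat e)   -- unreachable: the call was just `some`
        | some f => some (min (pvGet2 flows p.toNat e) f)

-- adjust_flows; `flow.getD 0` is only evaluated when parent[e] ≠ -1, where Python's flow is not None
def pvAdjustA (parent : List Int) (flow : Option Int) : Nat → Nat → List (List Int) → List (List Int)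
  | 0, _, flows => flows
  | fuel+1, e, flows =>
    let p := parent.getD e (-1)
    if p = -1 then flows
    else
      let flows' := pvAdjustA parent flow fuel p.toNat flows
      let f := flow.getD 0
      pvUpd2 (pvUpd2 flows' p.toNat e (· - f)) e p.toNat (· + f)

-- outer `while True`: fuel = (positive out-capacity of the source) + 1; each non-final
-- iteration pushes an integer flow ≥ 1 out of vertex 0, so this bound is never exhausted
def pvFuel (graph : List (List Int)) : Nat :=
  ((List.range graph.length).foldl (fun s i => s + max (pvGet2 graph 0 i) 0) 0).toNat + 1

def pvFindLoopA (n start e : Nat) : Nat → List (List Int) → Int → Int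
  | 0, _, res => res
  | fuel+1, flows, res =>
    let used := (List.replicate n false).set start true
    let parent := List.replicate n (-1 : Int)
    let bp := pvBfsA n flows e n [start] used parent
    let flow := pvGetFlowA flows bp.2 n e
    let flows' := pvAdjustA bp.2 flow n e flows
    match flow with
    | none => res
    | some f => pvFindLoopA n start e fuel flows' (res + f)

def pvFindFlowA (graph : List (List Int)) (start e : Nat) : Int :=
  let n := graph.length
  let flows := (List.range n).map (fun j => (List.range n).map (fun i => pvGet2 graph j i))
  pvFindLoopA n start e (pvFuel graph) flows 0

def process_test (graph : List (List Int)) : Option Int :=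
  (List.range' 1 (graph.length - 1)).foldl
    (fun mn v =>
      let flow := pvFindFlowA graph 0 v
      let mn := match mn with | none => some flow | some m => some m
      match mn with
      | none => some flow
      | some m => some (min m flow))
    none

-- ===== PORT B =====
-- BFS with an index-scanned list as queue; newly discovered vertices are computed as a batch
def pvBfsB (n : Nat) (flows : List (List Int)) (e : Nat) :
    Nat → List Nat → Nat → List Bool → List Int → List Bool × List Int
  | 0, _, _, used, parent => (used, parent)
  | fuel+1, order, i, used, parent =>
    if h : i < order.length then
      let v := order[i]
      if v = e then (used, parent)
      else
        let new := (List.range n).filter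
          (fun w => decide (pvGet2 flows v w > 0) && (used.getD w true == false))
        pvBfsB n flows e fuel (order ++ new) (i + 1)
          (new.foldl (fun u w => u.set w true) used)
          (new.foldl (fun pa w => pa.set w (Int.ofNat v)) parent)
    else (used, parent)

-- the augmenting path as an explicit edge list, one linear walk up the parent pointers
def pvPathB (parent : List Int) : Nat → Nat → List (Nat × Nat)
  | 0, _ => []
  | fuel+1, v =>
    let p := parent.getD v (-1)
    if p = -1 then [] else (p.toNat, v) :: pvPathB parent fuel p.toNat

def pvFindLoopB (n start e : Nat) : Nat → List (List Int) → Int → Int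
  | 0, _, res => res
  | fuel+1, flows, res =>
    let used := (List.replicate n false).set start true
    let parent := List.replicate n (-1 : Int)
    let bp := pvBfsB n flows e n [start] 0 used parent
    match pvPathB bp.2 n e with
    | [] => res
    | (u, w) :: rest =>
      let aug := rest.foldl (fun m p => min m (pvGet2 flows p.1 p.2)) (pvGet2 flows u w)
      let flows' := (((u, w) :: rest).reverse).foldl
        (fun fl p => pvUpd2 (pvUpd2 fl p.1 p.2 (· - aug)) p.2 p.1 (· + aug)) flows
      pvFindLoopB n start e fuel flows' (res + aug)

def pvFindFlowB (graph : List (List Int)) (start e : Nat) : Int :=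
  let n := graph.length
  let flows := graph.map (fun row => row.take n)
  pvFindLoopB n start e (pvFuel graph) flows 0

def process_test_alt (graph : List (List Int)) : Option Int :=
  match (List.range' 1 (graph.length - 1)).map (fun v => pvFindFlowB graph 0 v) with
  | [] => none
  | x :: xs => some (xs.foldl min x)

-- ===== PRECONDITION & SPEC =====
-- Pre_ = exactly where Python A returns: every row must have at least `len(graph)` entries
-- (the flows-matrix comprehension indexes graph[j][i] for all i < len(graph), IndexError otherwise)
def Pre_process_test (graph : List (List Int)) : Prop :=
  ∀ row ∈ graph, graph.length ≤ row.length
instance (graph : List (List Int)) : Decidable (Pre_process_test graph) := by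
  unfold Pre_process_test; infer_instance

def pvWitness_process_test : List (List Int) := [[0, 2], [1, 0]]

def Spec_process_test (graph : List (List Int)) (out : Option Int) : Prop := out = process_test_alt graph
instance (graph : List (List Int)) (out : Option Int) : Decidable (Spec_process_test graph out) := by unfold Spec_process_test; infer_instance

-- ===== CLAIM (what is proved, stated in full; the proofs are below) =====
def Claim_equal_process_test : Prop := ∀ (graph : List (List Int)), Dom_process_test graph → Pre_process_test graph → Spec_process_test graph (process_test graph)

-- ===== LEMMAS AND PROOFS =====

theorem pv_bfs_inner_eq (flows : List (List Int)) (v : Nat) (ws : List Nat) :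
    ws.Nodup → ∀ (q : List Nat) (u : List Bool) (pa : List Int),
    ws.foldl
      (fun (s : List Nat × List Bool × List Int) w =>
        if pvGet2 flows v w > 0 ∧ s.2.1.getD w true = false then
          (s.1 ++ [w], s.2.1.set w true, s.2.2.set w (Int.ofNat v))
        else s) (q, u, pa) =
    (q ++ ws.filter (fun w => decide (pvGet2 flows v w > 0) && (u.getD w true == false)),
     (ws.filter (fun w => decide (pvGet2 flows v w > 0) && (u.getD w true == false))).foldl
       (fun u w => u.set w true) u,
     (ws.filter (fun w => decide (pvGet2 flows v w > 0) && (u.getD w true == false))).foldl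
       (fun pa w => pa.set w (Int.ofNat v)) pa) := by
  induction ws with
  | nil => intro _ q u pa; simp
  | cons w ws ih =>
    intro hnd q u pa
    obtain ⟨hw, hnd'⟩ := List.nodup_cons.mp hnd
    simp only [List.foldl_cons, List.filter_cons]
    by_cases hc : pvGet2 flows v w > 0 ∧ u.getD w true = false
    · have hb : (decide (pvGet2 flows v w > 0) && (u.getD w true == false)) = true := by
        have hcd := hc.2
        simp only [List.getD] at hcd
        simp [hc.1, hcd]
      rw [if_pos hc, hb]
      rw [ih hnd' (q ++ [w]) (u.set w true) (pa.set w (Int.ofNat v))]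
      have hf : ws.filter (fun w' => decide (pvGet2 flows v w' > 0) && ((u.set w true).getD w' true == false))
          = ws.filter (fun w' => decide (pvGet2 flows v w' > 0) && (u.getD w' true == false)) := by
        apply List.filter_congr
        intro w' hw'
        have hne : w ≠ w' := fun hEq => hw (hEq ▸ hw')
        rw [show (u.set w true).getD w' true = u.getD w' true from by
          simp [List.getD, List.getElem?_set_ne hne]]
      rw [hf]
      simp [List.foldl_cons, List.append_assoc]
    · have hb : (decide (pvGet2 flows v w > 0) && (u.getD w true == false)) = false := by
        rcases not_and_or.mp hc with h1 | h2
        · simp [h1]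
        · have ht : u.getD w true = true := by
            cases hu : u.getD w true
            · exact absurd hu h2
            · rfl
          simp only [List.getD] at ht
          simp [ht]
      rw [if_neg hc, hb]
      simp only [if_false, Bool.false_eq_true]
      exact ih hnd' q u pa

theorem pv_bfs_eq (n : Nat) (flows : List (List Int)) (e : Nat) :
    ∀ (fuel : Nat) (order : List Nat) (i : Nat) (used : List Bool) (parent : List Int),
    i ≤ order.length →
    pvBfsA n flows e fuel (order.drop i) used parent = pvBfsB n flows e fuel order i used parent := by
  intro fuel
  induction fuel with
  | zero => intro order i used parent _; rfl
  | succ fuel ih =>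
    intro order i used parent hle
    by_cases hlt : i < order.length
    · rw [List.drop_eq_getElem_cons hlt]
      by_cases hv : order[i] = e
      · simp [pvBfsA, pvBfsB, hlt, hv]
      · simp only [pvBfsA, pvBfsB, dif_pos hlt, if_neg hv]
        rw [pv_bfs_inner_eq flows order[i] (List.range n) List.nodup_range]
        rw [← ih (order ++ (List.range n).filter
              (fun w => decide (pvGet2 flows order[i] w > 0) && (used.getD w true == false)))
            (i + 1) _ _ (by simp; omega)]
        rw [List.drop_append_of_le_length (by omega)]
    · have hd : order.drop i = [] := List.drop_eq_nil_of_le (by omega)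
      simp [pvBfsA, pvBfsB, hd, hlt]

theorem pv_minfold (flows : List (List Int)) (rest : List (Nat × Nat)) :
    ∀ (c x : Int), min c (rest.foldl (fun m p => min m (pvGet2 flows p.1 p.2)) x)
      = rest.foldl (fun m p => min m (pvGet2 flows p.1 p.2)) (min c x) := by
  induction rest with
  | nil => intro c x; simp
  | cons y ys ih =>
    intro c x
    simp only [List.foldl_cons]
    rw [← ih, ← ih, min_assoc]

theorem pv_getflow_eq (flows : List (List Int)) (parent : List Int) :
    ∀ (fuel : Nat) (e : Nat),
    pvGetFlowA flows parent fuel e =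
      match pvPathB parent fuel e with
      | [] => none
      | (u, w) :: rest => some (rest.foldl (fun m p => min m (pvGet2 flows p.1 p.2)) (pvGet2 flows u w)) := by
  intro fuel
  induction fuel with
  | zero => intro e; rfl
  | succ fuel ih =>
    intro e
    simp only [pvGetFlowA, pvPathB]
    by_cases hp : parent[e]?.getD (-1) = -1
    · simp [hp]
    · simp only [ih]
      cases hpath : pvPathB parent fuel ((parent[e]?.getD (-1)).toNat) with
      | nil => simp [hp, hpath]
      | cons uw rest => cases uw; simp [hp, hpath, List.foldl_cons, pv_minfold]

theorem pv_adjust_eq (parent : List Int) (f : Int) :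
    ∀ (fuel : Nat) (e : Nat) (flows : List (List Int)),
    pvAdjustA parent (some f) fuel e flows =
      ((pvPathB parent fuel e).reverse).foldl
        (fun fl p => pvUpd2 (pvUpd2 fl p.1 p.2 (· - f)) p.2 p.1 (· + f)) flows := by
  intro fuel
  induction fuel with
  | zero => intro e flows; rfl
  | succ fuel ih =>
    intro e flows
    simp only [pvAdjustA, pvPathB]
    by_cases hp : parent.getD e (-1) = -1
    · rw [if_pos hp, if_pos hp]; rfl
    · rw [if_neg hp, if_neg hp, ih, List.reverse_cons, List.foldl_append]
      simp

theorem pv_loop_eq (n start e : Nat) :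
    ∀ (fuel : Nat) (flows : List (List Int)) (res : Int),
    pvFindLoopA n start e fuel flows res = pvFindLoopB n start e fuel flows res := by
  intro fuel
  induction fuel with
  | zero => intro flows res; rfl
  | succ fuel ih =>
    intro flows res
    have hbfs : pvBfsB n flows e n [start] 0 ((List.replicate n false).set start true)
          (List.replicate n (-1 : Int))
        = pvBfsA n flows e n [start] ((List.replicate n false).set start true)
          (List.replicate n (-1 : Int)) :=
      (pv_bfs_eq n flows e n [start] 0 _ _ (by simp)).symm
    simp only [pvFindLoopA, pvFindLoopB, hbfs]
    rw [pv_getflow_eq]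
    cases hpath : pvPathB (pvBfsA n flows e n [start] ((List.replicate n false).set start true)
        (List.replicate n (-1 : Int))).2 n e with
    | nil => rfl
    | cons uw rest =>
      cases uw with
      | mk u w =>
        simp only
        rw [pv_adjust_eq, hpath]
        exact ih _ _

theorem pv_flows_init_eq (graph : List (List Int)) (h : Pre_process_test graph) :
    (List.range graph.length).map (fun j => (List.range graph.length).map (fun i => pvGet2 graph j i))
      = graph.map (fun row => row.take graph.length) := by
  apply List.ext_getElem
  · simp
  · intro j h1 h2
    have hj : j < graph.length := by simpa using h2
    have hrow : graph.length ≤ graph[j].length := h graph[j] (List.getElem_mem hj)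
    simp only [List.getElem_map, List.getElem_range]
    apply List.ext_getElem
    · simp; omega
    · intro i k1 k2
      have hi : i < graph.length := by simpa using k1
      simp only [List.getElem_map, List.getElem_range, List.getElem_take, pvGet2,
        List.getD_eq_getElem?_getD, List.getElem?_eq_getElem hj]
      simp [List.getElem?_eq_getElem (show i < graph[j].length by omega)]

theorem pv_findflow_eq (graph : List (List Int)) (h : Pre_process_test graph) (start e : Nat) :
    pvFindFlowA graph start e = pvFindFlowB graph start e := by
  simp only [pvFindFlowA, pvFindFlowB]
  rw [pv_flows_init_eq graph h]
  exact pv_loop_eq graph.length start e (pvFuel graph) _ 0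

theorem pv_fold_min_eq (f : Nat → Int) (l : List Nat) :
    ∀ (m : Int),
    l.foldl (fun mn v =>
      let flow := f v
      let mn := match mn with | none => some flow | some m => some m
      match mn with
      | none => some flow
      | some m => some (min m flow)) (some m) = some (l.foldl (fun a v => min a (f v)) m) := by
  induction l with
  | nil => intro m; rfl
  | cons v vs ih => intro m; simp only [List.foldl_cons]; exact ih (min m (f v))

-- ===== VERDICT (by name: the statement is the Claim_ definition above) =====
theorem process_test_spec : Claim_equal_process_test := by
  intro graph _ hpre
  unfold Spec_process_test process_test process_test_alt
  cases hl : List.range' 1 (graph.length - 1) with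
  | nil => rfl
  | cons v vs =>
    simp only [List.foldl_cons, List.map_cons]
    have h1 : ∀ w, pvFindFlowA graph 0 w = pvFindFlowB graph 0 w :=
      fun w => pv_findflow_eq graph hpre 0 w
    simp only [h1, min_self]
    rw [pv_fold_min_eq (fun w => pvFindFlowB graph 0 w) vs]
    rw [List.foldl_map]
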